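-- pv_equiv track=rewrite | github.com/Manasadhikari05/Meta-Hackathon- | content-moderation-openenv/env/graders/grader1.py | _same_reason_family
-- ===== SOURCE A (Python) =====
-- def _same_reason_family(pred: str, gold: str) -> bool:
--     families = [
--         {"abuse", "harassment", "insult", "mild_abuse", "borderline_abuse", "condescending", "aggressive"},
--         {"sarcasm", "mocking", "mixed_tone", "sarcasm_obfuscated", "obfuscated_sarcasm"},
--         {"spam", "scam", "misinformation", "nsfw_spam"},
--         {"safe", "criticism", "neutral_feedback", "balanced_feedback", "advice"},
--         {"violence", "self_harm", "violent_abuse", "obfuscated_abuse"},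
--         {"hate_speech", "hate_generalization"},
--     ]
--     return any(pred in fam and gold in fam for fam in families)
-- ===== SOURCE B (Python) =====
-- # B: precomputed flat label -> family-index table; the check is two O(1) lookups
-- # instead of A's linear scan over the list of six sets.  (objective: idiomatic)
-- _FAMILY_INDEX = {
--     "abuse": 0, "harassment": 0, "insult": 0, "mild_abuse": 0,
--     "borderline_abuse": 0, "condescending": 0, "aggressive": 0,
--     "sarcasm": 1, "mocking": 1, "mixed_tone": 1, "sarcasm_obfuscated": 1,
--     "obfuscated_sarcasm": 1,
--     "spam": 2, "scam": 2, "misinformation": 2, "nsfw_spam": 2,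
--     "safe": 3, "criticism": 3, "neutral_feedback": 3, "balanced_feedback": 3,
--     "advice": 3,
--     "violence": 4, "self_harm": 4, "violent_abuse": 4, "obfuscated_abuse": 4,
--     "hate_speech": 5, "hate_generalization": 5,
-- }
--
-- def _same_reason_family(pred: str, gold: str) -> bool:
--     i = _FAMILY_INDEX.get(pred)
--     return i is not None and i == _FAMILY_INDEX.get(gold)
-- ===== Notes on version B (the rewrite author's own statement) =====
-- stated objective: idiomatic
-- what changed: Replaced the linear scan over a list of six sets (membership test of both strings in each) by a precomputed flat label-to-family-index dict built once at module level; the check becomes two dict lookups and an index comparison with a None guard.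
import Mathlib
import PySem

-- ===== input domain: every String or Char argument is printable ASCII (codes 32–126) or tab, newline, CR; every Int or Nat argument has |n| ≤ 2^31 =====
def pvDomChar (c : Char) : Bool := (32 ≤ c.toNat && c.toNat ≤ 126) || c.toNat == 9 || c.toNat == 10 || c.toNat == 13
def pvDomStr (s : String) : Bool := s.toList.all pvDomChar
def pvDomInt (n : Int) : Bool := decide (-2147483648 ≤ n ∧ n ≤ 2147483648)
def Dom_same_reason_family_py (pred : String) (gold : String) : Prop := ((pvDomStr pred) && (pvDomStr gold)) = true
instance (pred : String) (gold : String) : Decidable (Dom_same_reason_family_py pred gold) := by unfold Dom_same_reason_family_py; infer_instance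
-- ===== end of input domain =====

-- B replaces A's scan over a list of six sets by one precomputed label→family-index
-- table and two lookups (objective: idiomatic; same observable behaviour, no mutation).

-- ===== PORT A =====
-- literal port of A: the local list of six set literals, then any(pred in fam and gold in fam)
def same_reason_family_py (pred : String) (gold : String) : Bool :=
  let families : List (PySem.Set String) :=
    [PySem.Set.ofList ["abuse", "harassment", "insult", "mild_abuse", "borderline_abuse", "condescending", "aggressive"],
     PySem.Set.ofList ["sarcasm", "mocking", "mixed_tone", "sarcasm_obfuscated", "obfuscated_sarcasm"],
     PySem.Set.ofList ["spam", "scam", "misinformation", "nsfw_spam"],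
     PySem.Set.ofList ["safe", "criticism", "neutral_feedback", "balanced_feedback", "advice"],
     PySem.Set.ofList ["violence", "self_harm", "violent_abuse", "obfuscated_abuse"],
     PySem.Set.ofList ["hate_speech", "hate_generalization"]]
  families.any (fun fam => PySem.Set.contains fam pred && PySem.Set.contains fam gold)

-- ===== PORT B =====
-- port of Source B: the module-level dict literal _FAMILY_INDEX …
def familyIndexTable : PySem.Dict String Int :=
  PySem.Dict.ofList [("abuse", 0), ("harassment", 0), ("insult", 0), ("mild_abuse", 0), ("borderline_abuse", 0), ("condescending", 0), ("aggressive", 0), ("sarcasm", 1), ("mocking", 1), ("mixed_tone", 1), ("sarcasm_obfuscated", 1), ("obfuscated_sarcasm", 1), ("spam", 2), ("scam", 2), ("misinformation", 2), ("nsfw_spam", 2), ("safe", 3), ("criticism", 3), ("neutral_feedback", 3), ("balanced_feedback", 3), ("advice", 3), ("violence", 4), ("self_harm", 4), ("violent_abuse", 4), ("obfuscated_abuse", 4), ("hate_speech", 5), ("hate_generalization", 5)]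

-- … and the two-lookup check: i = table.get(pred); i is not None and i == table.get(gold)
def same_reason_family_py_alt (pred : String) (gold : String) : Bool :=
  match PySem.Dict.get? familyIndexTable pred with
  | none => false
  | some i => PySem.Dict.get? familyIndexTable gold == some i

-- ===== PRECONDITION & SPEC =====
def Spec_same_reason_family_py (pred : String) (gold : String) (out : Bool) : Prop := out = same_reason_family_py_alt pred gold
instance (pred : String) (gold : String) (out : Bool) : Decidable (Spec_same_reason_family_py pred gold out) := by unfold Spec_same_reason_family_py; infer_instance

-- ===== CLAIM (what is proved, stated in full; the proofs are below) =====
def Claim_equal_same_reason_family_py : Prop := ∀ (pred : String) (gold : String), Dom_same_reason_family_py pred gold → Spec_same_reason_family_py pred gold (same_reason_family_py pred gold)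

-- ===== LEMMAS AND PROOFS =====

-- all 27 labels, in the order they first occur (= the table's key order)
def pvAllLabels : List String := ["abuse", "harassment", "insult", "mild_abuse", "borderline_abuse", "condescending", "aggressive", "sarcasm", "mocking", "mixed_tone", "sarcasm_obfuscated", "obfuscated_sarcasm", "spam", "scam", "misinformation", "nsfw_spam", "safe", "criticism", "neutral_feedback", "balanced_feedback", "advice", "violence", "self_harm", "violent_abuse", "obfuscated_abuse", "hate_speech", "hate_generalization"]

lemma pv_keys_table : (PySem.Dict.keys familyIndexTable) = pvAllLabels := by decide

lemma pv_get_none (s : String) (h : s ∉ pvAllLabels) :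
    PySem.Dict.get? familyIndexTable s = none := by
  rw [PySem.Dict.get?_eq_none_iff_not_mem_keys, pv_keys_table]; exact h

lemma pv_contains_false (L : List String) (s : String) (h : s ∉ L) :
    PySem.Set.contains (PySem.Set.ofList L) s = false := by
  rw [Bool.eq_false_iff]
  intro hct
  exact h ((PySem.Set.mem_ofList _ _).1 ((PySem.Set.contains_iff _ _).1 hct))

lemma pv_alt_gold_none (pred gold : String) (h : gold ∉ pvAllLabels) :
    same_reason_family_py_alt pred gold = false := by
  unfold same_reason_family_py_alt
  rw [pv_get_none gold h]
  cases PySem.Dict.get? familyIndexTable pred <;> rfl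

lemma pv_sub_notmem (L : List String) (s : String) (hsub : ∀ x ∈ L, x ∈ pvAllLabels)
    (h : s ∉ pvAllLabels) : s ∉ L := fun hmem => h (hsub s hmem)

lemma pv_a_false (pred gold : String) (h : pred ∉ pvAllLabels ∨ gold ∉ pvAllLabels) :
    same_reason_family_py pred gold = false := by
  unfold same_reason_family_py
  simp only [List.any_cons, List.any_nil, Bool.or_false, Bool.or_eq_false_iff,
    Bool.and_eq_false_iff]
  refine ⟨?_, ?_, ?_, ?_, ?_, ?_⟩ <;>
    rcases h with h | h
  all_goals first
    | exact Or.inl (pv_contains_false _ pred (pv_sub_notmem _ _ (by decide) h))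
    | exact Or.inr (pv_contains_false _ gold (pv_sub_notmem _ _ (by decide) h))

-- ===== VERDICT (by name: the statement is the Claim_ definition above) =====
theorem same_reason_family_py_spec : Claim_equal_same_reason_family_py := by
  intro pred gold _
  unfold Spec_same_reason_family_py
  by_cases hp : pred ∈ pvAllLabels
  · by_cases hg : gold ∈ pvAllLabels
    · simp only [pvAllLabels, List.mem_cons, List.not_mem_nil, or_false] at hp hg
      obtain rfl|rfl|rfl|rfl|rfl|rfl|rfl|rfl|rfl|rfl|rfl|rfl|rfl|rfl|rfl|rfl|rfl|rfl|rfl|rfl|rfl|rfl|rfl|rfl|rfl|rfl|rfl := hp <;>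
        (obtain rfl|rfl|rfl|rfl|rfl|rfl|rfl|rfl|rfl|rfl|rfl|rfl|rfl|rfl|rfl|rfl|rfl|rfl|rfl|rfl|rfl|rfl|rfl|rfl|rfl|rfl|rfl := hg <;> decide)
    · rw [pv_a_false pred gold (Or.inr hg), pv_alt_gold_none pred gold hg]
  · rw [pv_a_false pred gold (Or.inl hp)]
    unfold same_reason_family_py_alt
    rw [pv_get_none pred hp]
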